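-- pv_equiv track=rewrite | github.com/GDanielf/MSguided_navigation | src/triangulation.py | identificar_fileira
-- ===== SOURCE A (Python) =====
-- def identificar_fileira(indice):
--     """Identifica de qual fileira o índice pertence."""
--     fileiras = {
--         0: range(0, 10),
--         1: range(10, 19),
--         2: range(19, 26),
--         3: range(26, 35)
--     }
--
--     for fileira, indices in fileiras.items():
--         if indice in indices:
--             return fileira
--     return None
-- ===== SOURCE B (Python) =====
-- def identificar_fileira(indice):
--     """Identifica de qual fileira o indice pertence.
--
--     Binary search over the cumulative row boundaries instead of scanning
--     the four ranges for membership: row f covers [limites[f], limites[f+1]).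
--     """
--     limites = [0, 10, 19, 26, 35]
--     if not (limites[0] <= indice < limites[4]):
--         return None
--     lo, hi = 0, 4
--     while hi - lo > 1:
--         mid = (lo + hi) // 2
--         if indice >= limites[mid]:
--             lo = mid
--         else:
--             hi = mid
--     return lo
-- ===== Notes on version B (the rewrite author's own statement) =====
-- stated objective: alternative
-- what changed: Replaces the in-order membership scan of four ranges with a hand-written binary search on the cumulative boundary list [0,10,19,26,35], locating the row by interval halving on comparisons.
import Mathlib
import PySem

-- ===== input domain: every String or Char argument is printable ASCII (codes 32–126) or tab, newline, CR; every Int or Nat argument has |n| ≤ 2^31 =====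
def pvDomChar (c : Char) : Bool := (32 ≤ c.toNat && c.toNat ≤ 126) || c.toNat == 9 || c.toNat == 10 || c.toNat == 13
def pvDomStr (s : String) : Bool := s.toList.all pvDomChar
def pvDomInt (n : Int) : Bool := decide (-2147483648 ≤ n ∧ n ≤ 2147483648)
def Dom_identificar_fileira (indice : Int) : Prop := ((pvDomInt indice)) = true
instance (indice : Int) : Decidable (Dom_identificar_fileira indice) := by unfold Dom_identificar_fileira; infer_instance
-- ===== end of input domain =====

-- B replaces A's in-order membership scan over four ranges with a binary search on the cumulative boundary list (objective: alternative algorithm).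

-- ===== PORT A =====
-- A scans the {fileira: range} dict in insertion order and returns the first fileira whose range contains indice.
def identificar_fileira_go (indice : Int) : List (Int × List Int) → Option Int
  | [] => none
  | (fileira, indices) :: rest =>
    if indice ∈ indices then some fileira else identificar_fileira_go indice rest

def identificar_fileira (indice : Int) : Option Int :=
  let fileiras : List (Int × List Int) :=
    [(0, PySem.List.pyRange 0 10 1), (1, PySem.List.pyRange 10 19 1),
     (2, PySem.List.pyRange 19 26 1), (3, PySem.List.pyRange 26 35 1)]
  identificar_fileira_go indice fileiras

-- ===== PORT B =====
-- The while loop halves [lo, hi); fuel bounds the iteration count (hi - lo shrinks each step,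
-- so fuel = 4 is never exhausted for hi - lo ≤ 4) — a totality guard only, not an algorithm change.
def identificar_fileira_alt_go (indice : Int) (limites : List Int) : Nat → Nat → Nat → Nat
  | 0, lo, _ => lo
  | fuel + 1, lo, hi =>
    if hi - lo > 1 then
      let mid := (lo + hi) / 2
      if indice ≥ limites.getD mid 0 then identificar_fileira_alt_go indice limites fuel mid hi
      else identificar_fileira_alt_go indice limites fuel lo mid
    else lo

def identificar_fileira_alt (indice : Int) : Option Int :=
  let limites : List Int := [0, 10, 19, 26, 35]
  if ¬(limites.getD 0 0 ≤ indice ∧ indice < limites.getD 4 0) then none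
  else some (identificar_fileira_alt_go indice limites 4 0 4)

-- ===== PRECONDITION & SPEC =====
def Spec_identificar_fileira (indice : Int) (out : Option Int) : Prop := out = identificar_fileira_alt indice
instance (indice : Int) (out : Option Int) : Decidable (Spec_identificar_fileira indice out) := by unfold Spec_identificar_fileira; infer_instance

-- ===== CLAIM (what is proved, stated in full; the proofs are below) =====
def Claim_equal_identificar_fileira : Prop := ∀ (indice : Int), Dom_identificar_fileira indice → Spec_identificar_fileira indice (identificar_fileira indice)

-- ===== LEMMAS AND PROOFS =====
lemma identificar_fileira_out_of_range (i : Int) (h : i < 0 ∨ 35 ≤ i) :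
    identificar_fileira i = none ∧ identificar_fileira_alt i = none := by
  constructor
  · simp only [identificar_fileira, identificar_fileira_go]
    rw [show PySem.List.pyRange 0 10 1 = [0,1,2,3,4,5,6,7,8,9] from rfl,
        show PySem.List.pyRange 10 19 1 = [10,11,12,13,14,15,16,17,18] from rfl,
        show PySem.List.pyRange 19 26 1 = [19,20,21,22,23,24,25] from rfl,
        show PySem.List.pyRange 26 35 1 = [26,27,28,29,30,31,32,33,34] from rfl]
    simp only [List.mem_cons, List.not_mem_nil, or_false]
    split_ifs <;> first | rfl | omega
  · unfold identificar_fileira_alt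
    rw [if_pos]
    show ¬((0:Int) ≤ i ∧ i < 35)
    omega

-- ===== VERDICT (by name: the statement is the Claim_ definition above) =====
theorem identificar_fileira_spec : Claim_equal_identificar_fileira := by
  intro i _
  unfold Spec_identificar_fileira
  by_cases h : 0 ≤ i ∧ i < 35
  · obtain ⟨h1, h2⟩ := h
    interval_cases i <;> decide
  · obtain ⟨ha, hb⟩ := identificar_fileira_out_of_range i (by omega)
    rw [ha, hb]
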